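-- pv_equiv track=rewrite | github.com/sandralayas/My-Works | sem7exam.py | pluralizeFST
-- ===== SOURCE A (Python) =====
-- def pluralizeFST(word):
--     state = 'start'
--     exceptionals = ['x' , 'z' , 's']
--     result = []
--     for letter in word[::-1]:
--         if state == 'start':
--           if letter == '#':
--             state = 'next#'
--           else :
--             return None
--         elif state == 'next#':
--           if letter == 's':
--             state = 'nexts'
--           else :
--             return None
--         elif state == 'nexts':
--           if letter == '^':
--             state = 'morpheme'
--           else :
--             return None
--         elif state == 'morpheme':
--           if letter in exceptionals:
--             state = 'word'
--             result.append('s')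
--             result.append('e')
--             result.append(letter)
--           else :
--             state = 'word'
--             result.append('s')
--             result.append(letter)
--         elif state == 'word':
--           result.append(letter)
--     return ''.join(result[::-1])
-- ===== SOURCE B (Python) =====
-- def pluralizeFST(word):
--     if not word.endswith('^s#'):
--         return None
--     stem = word[:-3]
--     return stem + ('es' if stem.endswith(('x', 'z', 's')) else 's')
-- ===== Notes on version B (the rewrite author's own statement) =====
-- stated objective: simpler
-- what changed: Replaces the reversed-iteration five-state FSM with a single endswith('^s#') suffix check followed by a closed-form stem + 'es'/'s' construction.
-- intended difference: On the truncated inputs '', '#', 's#' and '^s#' A returns the accidental empty string (or '' built from no letters); B returns None for the first three (the word does not carry the full '^s#' plural morpheme) and 's' for '^s#' (the empty stem pluralized), which is what the suffix-rule intends. — e.g. on pluralizeFST("#"): A returns some "", B returns none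
import Mathlib
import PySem

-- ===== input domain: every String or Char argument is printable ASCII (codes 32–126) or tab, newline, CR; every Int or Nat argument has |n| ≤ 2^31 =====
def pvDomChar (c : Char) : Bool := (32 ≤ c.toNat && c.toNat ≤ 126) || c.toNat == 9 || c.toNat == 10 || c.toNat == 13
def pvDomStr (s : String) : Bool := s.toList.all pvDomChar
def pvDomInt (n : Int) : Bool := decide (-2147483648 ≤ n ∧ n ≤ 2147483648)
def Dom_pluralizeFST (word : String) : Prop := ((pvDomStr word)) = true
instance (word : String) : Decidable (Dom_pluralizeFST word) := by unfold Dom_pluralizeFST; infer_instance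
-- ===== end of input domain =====

-- B replaces A's reversed-iteration five-state FSM by one endswith('^s#') check plus a closed-form stem + 'es'/'s' (simpler; same O(n)).

-- ===== PORT A =====
-- the FSM loop of A, over the reversed character list, with the state kept as the same string labels
def pvLoopA : List Char → String → List Char → Option (List Char)
  | [], _, result => some result
  | letter :: rest, state, result =>
    if state = "start" then
      if letter = '#' then pvLoopA rest "next#" result else none
    else if state = "next#" then
      if letter = 's' then pvLoopA rest "nexts" result else none
    else if state = "nexts" then
      if letter = '^' then pvLoopA rest "morpheme" result else none
    else if state = "morpheme" then
      if letter ∈ ['x', 'z', 's'] then pvLoopA rest "word" (result ++ ['s', 'e', letter])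
      else pvLoopA rest "word" (result ++ ['s', letter])
    else pvLoopA rest state (result ++ [letter])

def pluralizeFST (word : String) : Option String :=
  (pvLoopA word.toList.reverse "start" []).map (fun r => String.ofList r.reverse)

-- ===== PORT B =====
def pluralizeFST_alt (word : String) : Option String :=
  if PySem.Str.endswith word "^s#" then
    let stem := PySem.Str.slice word none (some (-3))
    some (stem ++ (if PySem.Str.endswith stem "x" || PySem.Str.endswith stem "z" || PySem.Str.endswith stem "s"
                   then "es" else "s"))
  else none

-- ===== PRECONDITION & SPEC =====
-- On the truncated inputs '', '#', 's#' and '^s#' A returns the accidental empty string; B returns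
-- None for the first three (no full '^s#' morpheme present) and 's' for '^s#' (the empty stem
-- pluralized), which is what the suffix rule intends.
def D_pluralizeFST (word : String) : Prop :=
  word = "" ∨ word = "#" ∨ word = "s#" ∨ word = "^s#"
instance (word : String) : Decidable (D_pluralizeFST word) := by unfold D_pluralizeFST; infer_instance

def Spec_pluralizeFST (word : String) (out : Option String) : Prop :=
  ¬ D_pluralizeFST word → out = pluralizeFST_alt word
instance (word : String) (out : Option String) : Decidable (Spec_pluralizeFST word out) := by unfold Spec_pluralizeFST; infer_instance

def pvDiffWitness_pluralizeFST : String := "#"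
def pvDiffWitnessOut_pluralizeFST : (Option String) × (Option String) := (some "", none)

-- ===== CLAIM (what is proved, stated in full; the proofs are below) =====
def Claim_unchanged_pluralizeFST : Prop := ∀ (word : String), Dom_pluralizeFST word → Spec_pluralizeFST word (pluralizeFST word)
def Claim_changed_pluralizeFST : Prop := Dom_pluralizeFST (pvDiffWitness_pluralizeFST) ∧ D_pluralizeFST (pvDiffWitness_pluralizeFST) ∧ pluralizeFST (pvDiffWitness_pluralizeFST) = pvDiffWitnessOut_pluralizeFST.1 ∧ pluralizeFST_alt (pvDiffWitness_pluralizeFST) = pvDiffWitnessOut_pluralizeFST.2 ∧ pvDiffWitnessOut_pluralizeFST.1 ≠ pvDiffWitnessOut_pluralizeFST.2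
def Claim_exact_pluralizeFST : Prop := ∀ (word : String), Dom_pluralizeFST word → D_pluralizeFST word → pluralizeFST word ≠ pluralizeFST_alt word

-- ===== LEMMAS AND PROOFS =====

-- once the FSM is in state "word" it just copies the remaining letters
theorem pvLoopA_word (rest acc : List Char) :
    pvLoopA rest "word" acc = some (acc ++ rest) := by
  induction rest generalizing acc with
  | nil => simp [pvLoopA]
  | cons c cs ih => simp [pvLoopA, ih]

-- a one-character pattern is a suffix of xs ++ [a] iff it is that last character
theorem pvSuffix1 (xs : List Char) (a p : Char) :
    ([p] <:+ xs ++ [a]) ↔ p = a := by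
  constructor
  · rintro ⟨t, ht⟩
    have h2 := congrArg (fun l => l.getLast?) ht
    simpa using h2
  · rintro rfl; exact ⟨xs, rfl⟩

-- a three-character pattern is a suffix of xs ++ [c, b, a] iff it equals those three characters
theorem pvSuffix3 (xs : List Char) (c b a p q r : Char) :
    ([p, q, r] <:+ xs ++ [c, b, a]) ↔ (c = p ∧ b = q ∧ a = r) := by
  rw [← List.reverse_prefix]
  constructor
  · intro h
    simp only [List.reverse_append, List.reverse_cons, List.reverse_nil] at h
    simp only [List.nil_append, List.cons_append, List.cons_prefix_cons] at h
    tauto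
  · rintro ⟨rfl, rfl, rfl⟩
    simp
  
-- no three-character pattern is a suffix of a list of length < 3
theorem pvSuffixShort (l : List Char) (p q r : Char) (h : l.length < 3) :
    ¬ ([p, q, r] <:+ l) := by
  intro hs
  have := hs.length_le
  simp at this; omega

theorem pvStringEq (s t : String) (h : s.toList = t.toList) : s = t := by
  have := congrArg String.ofList h
  simpa using this

set_option maxHeartbeats 1000000 in
-- the key lemma, by cases on the reversed character list of the word
theorem pv_key (word : String) (hD : ¬ D_pluralizeFST word) :
    pluralizeFST word = pluralizeFST_alt word := by
  unfold pluralizeFST pluralizeFST_alt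
  match h : word.toList.reverse with
  | [] =>
    exfalso; apply hD; left
    apply pvStringEq
    simpa using congrArg List.reverse h
  | [a] =>
    have hw : word.toList = [a] := by simpa using congrArg List.reverse h
    by_cases ha : a = '#'
    · exfalso; apply hD; right; left
      apply pvStringEq; rw [hw, ha]; rfl
    · have hno : PySem.Chars.endswith word.toList ['^','s','#'] = false := by
        rw [Bool.eq_false_iff]
        intro hx
        exact pvSuffixShort _ _ _ _ (by rw [hw]; simp) ((PySem.Chars.endswith_iff _ _).mp hx)
      simp [pvLoopA, ha, hno]
  | [a, b] =>
    have hw : word.toList = [b, a] := by simpa using congrArg List.reverse h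
    by_cases ha : a = '#' <;> by_cases hb : b = 's'
    · exfalso; apply hD; right; right; left
      apply pvStringEq; rw [hw, ha, hb]; rfl
    all_goals
      have hno : PySem.Chars.endswith word.toList ['^','s','#'] = false := by
        rw [Bool.eq_false_iff]
        intro hx
        exact pvSuffixShort _ _ _ _ (by rw [hw]; simp) ((PySem.Chars.endswith_iff _ _).mp hx)
      simp [pvLoopA, ha, hb, hno]
  | [a, b, c] =>
    have hw : word.toList = [c, b, a] := by simpa using congrArg List.reverse h
    by_cases ha : a = '#' <;> by_cases hb : b = 's' <;> by_cases hc : c = '^'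
    · exfalso; apply hD; right; right; right
      apply pvStringEq; rw [hw, ha, hb, hc]; rfl
    all_goals
      have hno : PySem.Chars.endswith word.toList ['^','s','#'] = false := by
        rw [Bool.eq_false_iff]
        intro hx
        have := (PySem.Chars.endswith_iff _ _).mp hx
        rw [show word.toList = ([] : List Char) ++ [c, b, a] by simpa using hw, pvSuffix3] at this
        tauto
      simp [pvLoopA, ha, hb, hc, hno]
  | a :: b :: c :: d :: rest =>
    have hw : word.toList = (rest.reverse ++ [d]) ++ [c, b, a] := by
      have := congrArg List.reverse h
      simpa using this
    have hend : (PySem.Str.endswith word "^s#" = true) ↔ (c = '^' ∧ b = 's' ∧ a = '#') := by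
      rw [PySem.Str.endswith_eq, show (("^s#":String).toList) = ['^','s','#'] from rfl,
          PySem.Chars.endswith_iff, hw, pvSuffix3]
    have hstem : (PySem.Str.slice word none (some (-3))).toList = rest.reverse ++ [d] := by
      rw [PySem.Str.toList_slice, PySem.Chars.slice_eq_listSlice,
          PySem.List.slice_to_neg_ofNat _ 3 (by omega), hw]
      simp
      rw [show rest.reverse ++ [d, c, b, a] = (rest.reverse ++ [d]) ++ [c, b, a] from by simp]
      exact List.take_left' (by simp)
    by_cases ha : a = '#' <;> by_cases hb : b = 's' <;> by_cases hc : c = '^'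
    · subst ha hb hc
      rw [if_pos (hend.mpr ⟨rfl, rfl, rfl⟩)]
      have hsx : ∀ (pat : String),
          PySem.Str.endswith (PySem.Str.slice word none (some (-3))) pat = true
            ↔ pat.toList <:+ rest.reverse ++ [d] := by
        intro pat
        rw [PySem.Str.endswith_eq, PySem.Chars.endswith_iff, hstem]
      by_cases hd : d = 'x' ∨ d = 'z' ∨ d = 's'
      · have hA : pvLoopA ('#' :: 's' :: '^' :: d :: rest) "start" [] = some (['s','e',d] ++ rest) := by
          have hd' : d ∈ (['x','z','s'] : List Char) := by simpa using hd
          simp [pvLoopA, pvLoopA_word, hd']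
        have hif : (PySem.Str.endswith (PySem.Str.slice word none (some (-3))) "x"
              || PySem.Str.endswith (PySem.Str.slice word none (some (-3))) "z"
              || PySem.Str.endswith (PySem.Str.slice word none (some (-3))) "s") = true := by
          rw [Bool.or_eq_true, Bool.or_eq_true, hsx "x", hsx "z", hsx "s",
              show ("x" : String).toList = ['x'] from rfl,
              show ("z" : String).toList = ['z'] from rfl,
              show ("s" : String).toList = ['s'] from rfl,
              pvSuffix1, pvSuffix1, pvSuffix1]
          rcases hd with rfl | rfl | rfl
          · exact Or.inl (Or.inl rfl)
          · exact Or.inl (Or.inr rfl)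
          · exact Or.inr rfl
        rw [hA]
        simp only [Option.map_some]
        congr 1
        apply pvStringEq
        rw [String.toList_append, hstem, hif]
        simp
      · have hA : pvLoopA ('#' :: 's' :: '^' :: d :: rest) "start" [] = some (['s',d] ++ rest) := by
          have hd' : d ∉ (['x','z','s'] : List Char) := by simpa using hd
          simp [pvLoopA, pvLoopA_word, hd']
        have hif : (PySem.Str.endswith (PySem.Str.slice word none (some (-3))) "x"
              || PySem.Str.endswith (PySem.Str.slice word none (some (-3))) "z"
              || PySem.Str.endswith (PySem.Str.slice word none (some (-3))) "s") = false := by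
          have hne : ∀ (pat : String) (p : Char), pat.toList = [p] → p ≠ d →
              PySem.Str.endswith (PySem.Str.slice word none (some (-3))) pat = false := by
            intro pat p hp hpd
            rw [Bool.eq_false_iff]
            intro hx
            exact hpd ((pvSuffix1 _ _ _).mp (by rw [← hp]; exact (hsx pat).mp hx))
          push Not at hd
          rw [Bool.or_eq_false_iff, Bool.or_eq_false_iff]
          exact ⟨⟨hne "x" 'x' rfl (fun h => hd.1 h.symm), hne "z" 'z' rfl (fun h => hd.2.1 h.symm)⟩,
                 hne "s" 's' rfl (fun h => hd.2.2 h.symm)⟩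
        rw [hA]
        simp only [Option.map_some]
        congr 1
        apply pvStringEq
        rw [String.toList_append, hstem, hif]
        simp
    all_goals
      have hno : PySem.Chars.endswith word.toList ['^','s','#'] = false := by
        rw [Bool.eq_false_iff]
        intro hx
        have : (PySem.Str.endswith word "^s#" = true) := by
          rw [PySem.Str.endswith_eq, show (("^s#":String).toList) = ['^','s','#'] from rfl]
          exact hx
        rw [hend] at this
        tauto
      simp [pvLoopA, ha, hb, hc, hno]

-- ===== VERDICT (by name: the statement is the Claim_ definition above) =====
theorem pluralizeFST_spec : Claim_unchanged_pluralizeFST := by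
  intro word _ hD
  exact pv_key word hD

theorem pluralizeFST_changed : Claim_changed_pluralizeFST := by
  unfold Claim_changed_pluralizeFST; decide

theorem pluralizeFST_tight : Claim_exact_pluralizeFST := by
  intro word _ hD
  rcases hD with rfl | rfl | rfl | rfl <;> decide
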